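-- pv_equiv track=rewrite | github.com/Steven-Mendez/starter-template-fastapi | tests/unit/test_hexagonal_boundaries.py | resolve_local_import_targets
-- ===== SOURCE A (Python) =====
-- from typing import Dict, List, Set, get_args, get_origin, get_type_hints
--
-- def resolve_local_import_targets(
--     import_name: str,
--     known_modules: Set[str],
-- ) -> Set[str]:
--     if import_name in known_modules:
--         return {import_name}
--
--     prefix = f"{import_name}."
--     direct_children = {
--         module
--         for module in known_modules
--         if module.startswith(prefix) and module.count(".") == import_name.count(".") + 1
--     }
--     if direct_children:
--         return direct_children
--
--     return {module for module in known_modules if module.startswith(prefix)}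
-- ===== SOURCE B (Python) =====
-- def resolve_local_import_targets(import_name, known_modules):
--     target = import_name.split(".")
--     k = len(target)
--     exact = set()
--     children = set()
--     deeper = set()
--     for module in known_modules:
--         parts = module.split(".")
--         if parts[:k] != target:
--             continue
--         if len(parts) == k:
--             exact.add(module)
--         elif len(parts) == k + 1:
--             children.add(module)
--         else:
--             deeper.add(module)
--     if exact:
--         return {import_name}
--     if children:
--         return children
--     return deeper
-- ===== Notes on version B (the rewrite author's own statement) =====
-- stated objective: alternative
-- what changed: B tokenizes every name into its dot-separated component path once and classifies each module by list comparison against the target path (equal / one component longer / longer) in a single bucketing pass, replacing A's string-level startswith-and-dot-count filters and its up-to-three separate scans.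
import Mathlib
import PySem

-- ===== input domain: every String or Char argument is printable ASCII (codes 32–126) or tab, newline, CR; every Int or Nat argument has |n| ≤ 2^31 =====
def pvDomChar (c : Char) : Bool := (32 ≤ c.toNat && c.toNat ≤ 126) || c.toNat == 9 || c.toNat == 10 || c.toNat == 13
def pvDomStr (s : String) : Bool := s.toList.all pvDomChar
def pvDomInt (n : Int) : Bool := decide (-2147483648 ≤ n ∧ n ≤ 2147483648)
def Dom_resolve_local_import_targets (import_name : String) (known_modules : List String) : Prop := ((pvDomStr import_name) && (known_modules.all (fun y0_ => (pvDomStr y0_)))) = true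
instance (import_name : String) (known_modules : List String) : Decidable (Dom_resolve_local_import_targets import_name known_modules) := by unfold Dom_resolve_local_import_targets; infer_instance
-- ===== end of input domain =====

-- B tokenizes each name into its dot-separated component path once and classifies modules by
-- path-list comparison (equal / one component longer / longer) in one bucketing pass, instead of
-- A's string-level startswith-and-dot-count filters in up-to-three scans; objective: alternative.

-- ===== PORT A =====
def resolve_local_import_targets (import_name : String) (known_modules : List String) : List String :=
  if PySem.Set.contains known_modules import_name then [import_name]
  else
    let prefix_ := import_name ++ "."
    let direct_children := known_modules.filter (fun module =>
      PySem.Str.startswith module prefix_ &&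
      (PySem.Str.count module "." == PySem.Str.count import_name "." + 1))
    if direct_children ≠ [] then direct_children
    else known_modules.filter (fun module => PySem.Str.startswith module prefix_)

-- ===== PORT B =====
-- module.split(".") with the non-empty separator "." is PySem.Chars.splitOn on the code points.
def resolve_local_import_targets_alt (import_name : String) (known_modules : List String) : List String :=
  let target := PySem.Chars.splitOn import_name.toList ['.']
  let k := target.length
  let acc := known_modules.foldl
    (fun (p : List String × List String × List String) module =>
      let parts := PySem.Chars.splitOn module.toList ['.']
      if parts.take k ≠ target then p
      else if parts.length = k then (PySem.Set.add p.1 module, p.2.1, p.2.2)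
      else if parts.length = k + 1 then (p.1, PySem.Set.add p.2.1 module, p.2.2)
      else (p.1, p.2.1, PySem.Set.add p.2.2 module))
    ([], [], [])
  if acc.1 ≠ [] then [import_name]
  else if acc.2.1 ≠ [] then acc.2.1
  else acc.2.2

-- ===== PRECONDITION & SPEC =====
-- Pre_: known_modules encodes a Python set, so the list holds distinct elements (the type
-- convention's set invariant); it excludes nothing a Python caller can pass.
def Pre_resolve_local_import_targets (_import_name : String) (known_modules : List String) : Prop :=
  known_modules.Nodup
instance (import_name : String) (known_modules : List String) : Decidable (Pre_resolve_local_import_targets import_name known_modules) := by unfold Pre_resolve_local_import_targets; infer_instance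
def pvWitness_resolve_local_import_targets : String × List String := ("a", ["a.b", "a.b.c", "d"])

def Spec_resolve_local_import_targets (import_name : String) (known_modules : List String) (out : List String) : Prop := out = resolve_local_import_targets_alt import_name known_modules
instance (import_name : String) (known_modules : List String) (out : List String) : Decidable (Spec_resolve_local_import_targets import_name known_modules out) := by unfold Spec_resolve_local_import_targets; infer_instance

-- ===== CLAIM (what is proved, stated in full; the proofs are below) =====
def Claim_equal_resolve_local_import_targets : Prop := ∀ (import_name : String) (known_modules : List String), Dom_resolve_local_import_targets import_name known_modules → Pre_resolve_local_import_targets import_name known_modules → Spec_resolve_local_import_targets import_name known_modules (resolve_local_import_targets import_name known_modules)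

-- ===== LEMMAS AND PROOFS =====

-- ---- Bridging PySem's fuel-based split/count to Mathlib's List.splitOn / List.count ----

theorem pv_splitOn_cons (c h : Char) (t : List Char) :
    (h :: t).splitOn c = if h = c then [] :: t.splitOn c else List.modifyHead (h :: ·) (t.splitOn c) := by
  simp only [List.splitOn, List.splitOnP_cons, beq_iff_eq]

theorem pv_chars_splitOn_go (c : Char) (l : List Char) : ∀ (fuel : Nat) (cur : List Char)
    (acc : List (List Char)), l.length ≤ fuel →
    PySem.Chars.splitOn.go [c] fuel l cur acc
      = acc.reverse ++ List.modifyHead (cur.reverse ++ ·) (l.splitOn c) := by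
  induction l with
  | nil =>
    intro fuel cur acc _
    cases fuel <;> simp [PySem.Chars.splitOn.go, List.splitOn_nil]
  | cons h t ih =>
    intro fuel cur acc hf
    cases fuel with
    | zero => simp at hf
    | succ f =>
      simp only [List.length_cons, Nat.succ_le_succ_iff] at hf
      rw [pv_splitOn_cons]
      by_cases hc : h = c
      · subst hc
        have hpre : [h].isPrefixOf (h :: t) = true := by simp [List.isPrefixOf]
        rw [PySem.Chars.splitOn.go, if_pos hpre, if_pos rfl]
        simp only [List.length_cons, List.length_nil, List.drop_succ_cons, List.drop_zero]
        rw [ih f [] (cur.reverse :: acc) hf]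
        cases List.splitOn h t <;> simp [List.modifyHead]
      · have hpre : [c].isPrefixOf (h :: t) = false := by
          simp only [List.isPrefixOf, List.isPrefixOf_nil_left, Bool.and_true, beq_iff_eq]
          exact decide_eq_false (fun e => hc e.symm)
        rw [PySem.Chars.splitOn.go, if_neg (by simp [hpre]), if_neg hc]
        rw [ih f (h :: cur) acc hf, List.modifyHead_modifyHead]
        have hfun : ((fun x => cur.reverse ++ x) ∘ fun x => h :: x)
            = (fun x : List Char => (h :: cur).reverse ++ x) := by
          funext x; simp
        rw [hfun]

theorem pv_chars_splitOn (c : Char) (cs : List Char) :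
    PySem.Chars.splitOn cs [c] = cs.splitOn c := by
  rw [PySem.Chars.splitOn, pv_chars_splitOn_go c cs (cs.length + 1) [] [] (by omega)]
  cases h : cs.splitOn c <;> simp [List.modifyHead]

theorem pv_chars_count_go (c : Char) (l : List Char) : ∀ (fuel : Nat) (acc : Nat),
    l.length ≤ fuel → PySem.Chars.count.go [c] fuel l acc = acc + l.count c := by
  induction l with
  | nil => intro fuel acc _; cases fuel <;> simp [PySem.Chars.count.go]
  | cons h t ih =>
    intro fuel acc hf
    cases fuel with
    | zero => simp at hf
    | succ f =>
      simp only [List.length_cons, Nat.succ_le_succ_iff] at hf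
      by_cases hc : c = h
      · subst hc
        have hpre : [c].isPrefixOf (c :: t) = true := by simp [List.isPrefixOf]
        rw [PySem.Chars.count.go, if_pos hpre]
        simp only [List.length_cons, List.length_nil, List.drop_succ_cons, List.drop_zero]
        rw [ih f (acc + 1) hf]
        simp [List.count_cons]
        omega
      · have hpre : [c].isPrefixOf (h :: t) = false := by
          simp only [List.isPrefixOf, List.isPrefixOf_nil_left, Bool.and_true, beq_iff_eq]
          exact decide_eq_false hc
        rw [PySem.Chars.count.go, if_neg (by simp [hpre]), ih f acc hf]
        simp only [List.count_cons, beq_iff_eq]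
        rw [if_neg (fun e => hc e.symm)]
        omega

theorem pv_chars_count (c : Char) (cs : List Char) :
    PySem.Chars.count cs [c] = cs.count c := by
  rw [PySem.Chars.count]
  rw [if_neg (by simp), pv_chars_count_go c cs cs.length 0 (le_refl _)]
  simp

-- ---- Structure of List.splitOn on a single separator ----

theorem pv_splitOn_ne_nil (c : Char) (cs : List Char) : cs.splitOn c ≠ [] := by
  simp [List.splitOn]; exact List.splitOnP_ne_nil _ _

theorem pv_length_splitOn (c : Char) (cs : List Char) :
    (cs.splitOn c).length = cs.count c + 1 := by
  induction cs with
  | nil => simp [List.splitOn_nil]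
  | cons h t ih =>
    rw [pv_splitOn_cons]
    by_cases hc : h = c
    · simp [hc, List.count_cons, ih]
    · simp [hc, List.length_modifyHead, ih, List.count_cons]

theorem pv_splitOn_append (c : Char) (a b : List Char) :
    (a ++ c :: b).splitOn c = a.splitOn c ++ b.splitOn c := by
  induction a with
  | nil =>
    simp only [List.nil_append]
    rw [pv_splitOn_cons, if_pos rfl, List.splitOn_nil]
    rfl
  | cons h t ih =>
    simp only [List.cons_append]
    rw [pv_splitOn_cons, pv_splitOn_cons, ih]
    by_cases hc : h = c
    · simp [hc]
    · simp only [hc, if_false]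
      obtain ⟨x, xs, hx⟩ := List.exists_cons_of_ne_nil (pv_splitOn_ne_nil c t)
      rw [hx]
      simp [List.modifyHead]

theorem pv_splitOn_inj (c : Char) {a b : List Char} (h : a.splitOn c = b.splitOn c) : a = b := by
  have := List.intercalate_splitOn a c
  rw [h, List.intercalate_splitOn] at this
  exact this.symm

theorem pv_intercalate_append (c : Char) (A B : List (List Char)) (hA : A ≠ []) (hB : B ≠ []) :
    [c].intercalate (A ++ B) = [c].intercalate A ++ c :: [c].intercalate B := by
  induction A with
  | nil => exact (hA rfl).elim
  | cons x t ih =>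
    cases t with
    | nil =>
      obtain ⟨y, ys, hy⟩ := List.exists_cons_of_ne_nil hB
      subst hy
      simp [List.intercalate, List.intersperse]
    | cons y ys =>
      have : [c].intercalate (x :: y :: ys) = x ++ c :: [c].intercalate (y :: ys) := by
        simp [List.intercalate, List.intersperse]
      rw [List.cons_append]
      have h2 : [c].intercalate (x :: ((y :: ys) ++ B)) = x ++ c :: [c].intercalate ((y :: ys) ++ B) := by
        cases B <;> simp [List.intercalate, List.intersperse]
      rw [h2, ih (by simp), this]
      simp

-- characterisation of "m starts with n ++ '.'" in terms of component paths
theorem pv_prefix_iff (m n : List Char) :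
    ((m.splitOn '.').take (n.splitOn '.').length = n.splitOn '.'
      ∧ (n.splitOn '.').length < (m.splitOn '.').length)
    ↔ (n ++ ['.']) <+: m := by
  constructor
  · rintro ⟨htake, hlen⟩
    have hsplit : m.splitOn '.' = n.splitOn '.' ++ (m.splitOn '.').drop (n.splitOn '.').length := by
      conv_lhs => rw [← List.take_append_drop (n.splitOn '.').length (m.splitOn '.')]
      rw [htake]
    have hdrop : (m.splitOn '.').drop (n.splitOn '.').length ≠ [] := by
      rw [Ne, List.drop_eq_nil_iff]
      omega
    have hm := List.intercalate_splitOn m '.'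
    rw [hsplit, pv_intercalate_append '.' _ _ (pv_splitOn_ne_nil _ _) hdrop,
      List.intercalate_splitOn] at hm
    refine ⟨['.'].intercalate ((m.splitOn '.').drop (n.splitOn '.').length), ?_⟩
    simpa using hm
  · rintro ⟨b, hb⟩
    subst hb
    have : (n ++ ['.'] ++ b) = n ++ '.' :: b := by simp
    rw [this, pv_splitOn_append]
    constructor
    · exact List.take_left
    · have := pv_splitOn_ne_nil '.' b
      simp [List.length_append]
      cases h : b.splitOn '.' with
      | nil => exact (this h).elim
      | cons x xs => simp

-- the three path-classification tests, rephrased as A's string tests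
theorem pv_exact_iff (m n : String) :
    ((PySem.Chars.splitOn m.toList ['.']).take (PySem.Chars.splitOn n.toList ['.']).length
        = PySem.Chars.splitOn n.toList ['.']
      ∧ (PySem.Chars.splitOn m.toList ['.']).length = (PySem.Chars.splitOn n.toList ['.']).length)
    ↔ m = n := by
  rw [pv_chars_splitOn, pv_chars_splitOn]
  constructor
  · rintro ⟨htake, hlen⟩
    have : m.toList.splitOn '.' = n.toList.splitOn '.' := by
      rw [← htake, ← hlen, List.take_length]
    exact String.toList_injective (pv_splitOn_inj '.' this)
  · rintro rfl
    exact ⟨by rw [List.take_length], rfl⟩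

theorem pv_startswith_iff (m n : String) :
    (PySem.Str.startswith m (n ++ ".") = true)
    ↔ ((PySem.Chars.splitOn m.toList ['.']).take (PySem.Chars.splitOn n.toList ['.']).length
          = PySem.Chars.splitOn n.toList ['.']
        ∧ (PySem.Chars.splitOn n.toList ['.']).length < (PySem.Chars.splitOn m.toList ['.']).length) := by
  rw [PySem.Str.startswith_eq, PySem.Chars.startswith_iff, pv_chars_splitOn, pv_chars_splitOn,
    pv_prefix_iff]
  simp [String.toList_append]

theorem pv_count_len (m : String) :
    PySem.Str.count m "." + 1 = (PySem.Chars.splitOn m.toList ['.']).length := by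
  rw [PySem.Str.count_eq, pv_chars_splitOn]
  have : (".".toList : List Char) = ['.'] := rfl
  rw [this, pv_chars_count, pv_length_splitOn]

-- ---- The one-pass classifying fold equals three filters (fresh, duplicate-free input) ----

theorem pv_foldl_classify (q0 q1 q2 : String → Bool)
    (hex01 : ∀ x, q0 x = true → q1 x = false) (hex02 : ∀ x, q0 x = true → q2 x = false)
    (hex12 : ∀ x, q1 x = true → q2 x = false)
    (l : List String) (s0 s1 s2 : List String) (hl : l.Nodup)
    (h0 : ∀ x ∈ l, x ∉ s0) (h1 : ∀ x ∈ l, x ∉ s1) (h2 : ∀ x ∈ l, x ∉ s2) :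
    l.foldl (fun (p : List String × List String × List String) x =>
        if q0 x then (PySem.Set.add p.1 x, p.2.1, p.2.2)
        else if q1 x then (p.1, PySem.Set.add p.2.1 x, p.2.2)
        else if q2 x then (p.1, p.2.1, PySem.Set.add p.2.2 x)
        else p) (s0, s1, s2)
      = (s0 ++ l.filter q0, s1 ++ l.filter q1, s2 ++ l.filter q2) := by
  induction l generalizing s0 s1 s2 with
  | nil => simp
  | cons x xs ih =>
    have hnodup := hl
    simp only [List.nodup_cons] at hnodup
    have hx0 : x ∉ s0 := h0 x (by simp)
    have hx1 : x ∉ s1 := h1 x (by simp)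
    have hx2 : x ∉ s2 := h2 x (by simp)
    have step : ∀ (s : List String) (hx : x ∉ s), PySem.Set.add s x = s ++ [x] :=
      fun s hx => PySem.Set.add_of_not_mem hx
    have hnext : ∀ (s : List String), (∀ y ∈ x :: xs, y ∉ s) → ∀ y ∈ xs, y ∉ s ++ [x] := by
      intro s hs y hy
      simp only [List.mem_append, List.mem_singleton]
      rintro (h | rfl)
      · exact hs y (List.mem_cons_of_mem _ hy) h
      · exact hnodup.1 hy
    have hkeep : ∀ (s : List String), (∀ y ∈ x :: xs, y ∉ s) → ∀ y ∈ xs, y ∉ s :=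
      fun s hs y hy => hs y (List.mem_cons_of_mem _ hy)
    simp only [List.foldl_cons, List.filter_cons]
    by_cases hq0 : q0 x
    · simp only [hq0, if_true, step s0 hx0, hex01 x hq0, hex02 x hq0,
        Bool.false_eq_true, if_false]
      rw [ih _ _ _ hnodup.2 (hnext s0 h0) (hkeep s1 h1) (hkeep s2 h2)]
      simp
    · rw [Bool.not_eq_true] at hq0
      by_cases hq1 : q1 x
      · simp only [hq0, hq1, if_true, Bool.false_eq_true, if_false, step s1 hx1,
          hex12 x hq1]
        rw [ih _ _ _ hnodup.2 (hkeep s0 h0) (hnext s1 h1) (hkeep s2 h2)]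
        simp
      · rw [Bool.not_eq_true] at hq1
        by_cases hq2 : q2 x
        · simp only [hq0, hq1, hq2, if_true, Bool.false_eq_true, if_false, step s2 hx2]
          rw [ih _ _ _ hnodup.2 (hkeep s0 h0) (hkeep s1 h1) (hnext s2 h2)]
          simp
        · rw [Bool.not_eq_true] at hq2
          simp only [hq0, hq1, hq2, Bool.false_eq_true, if_false]
          rw [ih _ _ _ hnodup.2 (hkeep s0 h0) (hkeep s1 h1) (hkeep s2 h2)]

-- ---- the three classifiers of port B, as named Bool predicates ----

def pvQ0 (n m : String) : Bool := decide
  ((PySem.Chars.splitOn m.toList ['.']).take (PySem.Chars.splitOn n.toList ['.']).length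
      = PySem.Chars.splitOn n.toList ['.']
    ∧ (PySem.Chars.splitOn m.toList ['.']).length = (PySem.Chars.splitOn n.toList ['.']).length)

def pvQ1 (n m : String) : Bool := decide
  ((PySem.Chars.splitOn m.toList ['.']).take (PySem.Chars.splitOn n.toList ['.']).length
      = PySem.Chars.splitOn n.toList ['.']
    ∧ (PySem.Chars.splitOn m.toList ['.']).length = (PySem.Chars.splitOn n.toList ['.']).length + 1)

def pvQ2 (n m : String) : Bool := decide
  ((PySem.Chars.splitOn m.toList ['.']).take (PySem.Chars.splitOn n.toList ['.']).length
      = PySem.Chars.splitOn n.toList ['.']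
    ∧ (PySem.Chars.splitOn n.toList ['.']).length + 1 < (PySem.Chars.splitOn m.toList ['.']).length)

theorem pv_take_len {p t : List (List Char)} (h : p.take t.length = t) : t.length ≤ p.length := by
  have := congrArg List.length h
  simp at this
  omega

theorem pvQ0_iff (n m : String) : pvQ0 n m = true ↔ m = n := by
  rw [pvQ0, decide_eq_true_iff, pv_exact_iff]

theorem pvQ1_iff (n m : String) :
    pvQ1 n m = true ↔ (PySem.Str.startswith m (n ++ ".") &&
      (PySem.Str.count m "." == PySem.Str.count n "." + 1)) = true := by
  rw [pvQ1, decide_eq_true_iff, Bool.and_eq_true, beq_iff_eq, pv_startswith_iff,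
    ← pv_count_len m, ← pv_count_len n]
  constructor
  · rintro ⟨h1, h2⟩
    exact ⟨⟨h1, by omega⟩, by omega⟩
  · rintro ⟨⟨h1, _⟩, h3⟩
    exact ⟨h1, by omega⟩

theorem pvQ1_eq (n m : String) :
    pvQ1 n m = (PySem.Str.startswith m (n ++ ".") &&
      (PySem.Str.count m "." == PySem.Str.count n "." + 1)) := by
  rw [Bool.eq_iff_iff]
  exact pvQ1_iff n m

theorem pvQ2_eq_of_not_child (n m : String) (h : pvQ1 n m = false) :
    PySem.Str.startswith m (n ++ ".") = pvQ2 n m := by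
  have h1 : ¬ ((PySem.Chars.splitOn m.toList ['.']).take (PySem.Chars.splitOn n.toList ['.']).length
      = PySem.Chars.splitOn n.toList ['.']
    ∧ (PySem.Chars.splitOn m.toList ['.']).length = (PySem.Chars.splitOn n.toList ['.']).length + 1) := by
    rw [← decide_eq_true_iff (p := _ ∧ _)]
    simp [pvQ1] at h
    simpa using h
  rw [Bool.eq_iff_iff, pvQ2, decide_eq_true_iff, pv_startswith_iff]
  constructor
  · rintro ⟨ht, hl⟩
    refine ⟨ht, ?_⟩
    rcases Nat.lt_or_ge ((PySem.Chars.splitOn n.toList ['.']).length + 1)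
        ((PySem.Chars.splitOn m.toList ['.']).length) with h2 | h2
    · exact h2
    · exact absurd ⟨ht, by omega⟩ h1
  · rintro ⟨ht, hl⟩
    exact ⟨ht, by omega⟩

-- ===== VERDICT (by name: the statement is the Claim_ definition above) =====
theorem resolve_local_import_targets_spec : Claim_equal_resolve_local_import_targets := by
  intro n L _ hpre
  unfold Spec_resolve_local_import_targets
  simp only [resolve_local_import_targets, resolve_local_import_targets_alt]
  -- the step function of port B is the three-way classifier on pvQ0/pvQ1/pvQ2
  have hstep : (fun (p : List String × List String × List String) module =>
      let parts := PySem.Chars.splitOn module.toList ['.']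
      if parts.take (PySem.Chars.splitOn n.toList ['.']).length ≠ PySem.Chars.splitOn n.toList ['.'] then p
      else if parts.length = (PySem.Chars.splitOn n.toList ['.']).length then (PySem.Set.add p.1 module, p.2.1, p.2.2)
      else if parts.length = (PySem.Chars.splitOn n.toList ['.']).length + 1 then (p.1, PySem.Set.add p.2.1 module, p.2.2)
      else (p.1, p.2.1, PySem.Set.add p.2.2 module))
      = (fun (p : List String × List String × List String) x =>
        if pvQ0 n x = true then (PySem.Set.add p.1 x, p.2.1, p.2.2)
        else if pvQ1 n x = true then (p.1, PySem.Set.add p.2.1 x, p.2.2)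
        else if pvQ2 n x = true then (p.1, p.2.1, PySem.Set.add p.2.2 x)
        else p) := by
    funext p m
    simp only [pvQ0, pvQ1, pvQ2, decide_eq_true_iff]
    by_cases ht : (PySem.Chars.splitOn m.toList ['.']).take (PySem.Chars.splitOn n.toList ['.']).length
        = PySem.Chars.splitOn n.toList ['.']
    · have hge := pv_take_len ht
      by_cases h0 : (PySem.Chars.splitOn m.toList ['.']).length = (PySem.Chars.splitOn n.toList ['.']).length
      · simp [ht, h0]
      · by_cases h1 : (PySem.Chars.splitOn m.toList ['.']).length = (PySem.Chars.splitOn n.toList ['.']).length + 1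
        · simp [ht, h0, h1]
        · have h2 : (PySem.Chars.splitOn n.toList ['.']).length + 1 < (PySem.Chars.splitOn m.toList ['.']).length := by
            omega
          simp [ht, h0, h1, h2]
    · simp [ht]
  rw [hstep, pv_foldl_classify (pvQ0 n) (pvQ1 n) (pvQ2 n)
      (fun x h0 => by
        rw [pvQ0_iff] at h0
        subst h0
        simp [pvQ1]
      )
      (fun x h0 => by
        rw [pvQ0_iff] at h0
        subst h0
        simp [pvQ2]
      )
      (fun x h1 => by
        simp only [pvQ1, decide_eq_true_iff] at h1
        simp only [pvQ2, decide_eq_false_iff_not]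
        rintro ⟨_, hl⟩
        omega
      )
      L [] [] [] hpre (by simp) (by simp) (by simp)]
  simp only [List.nil_append]
  -- the exact bucket is non-empty exactly when import_name is a known module
  have hf0 : (L.filter (pvQ0 n) ≠ []) ↔ PySem.Set.contains L n = true := by
    rw [Ne, List.filter_eq_nil_iff, PySem.Set.contains_iff]
    push_neg
    constructor
    · rintro ⟨m, hm, hq⟩
      rw [pvQ0_iff] at hq
      exact hq ▸ hm
    · intro hn
      exact ⟨n, hn, by rw [pvQ0_iff]⟩
  have hf1 : L.filter (pvQ1 n) = L.filter (fun module =>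
      PySem.Str.startswith module (n ++ ".") &&
        (PySem.Str.count module "." == PySem.Str.count n "." + 1)) := by
    apply List.filter_congr
    intro m _
    exact pvQ1_eq n m
  rw [← hf1]
  by_cases hc : PySem.Set.contains L n = true
  · rw [if_pos hc, if_pos (hf0.mpr hc)]
  · rw [if_neg hc, if_neg (fun h => hc (hf0.mp h))]
    by_cases hch : L.filter (pvQ1 n) ≠ []
    · rw [if_pos hch, if_pos hch]
    · rw [if_neg hch, if_neg hch]
      apply List.filter_congr
      intro m hm
      have hp1 : pvQ1 n m = false := by
        rw [Ne, not_not] at hch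
        have := List.filter_eq_nil_iff.mp hch m hm
        simpa using this
      exact pvQ2_eq_of_not_child n m hp1
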